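-- pv_equiv track=rewrite | github.com/rickhallett/nagini | src/koans/koans/about_scoring_project.py | score_with_counter
-- ===== SOURCE A (Python) =====
-- from collections import Counter
--
-- def score_with_counter(turns):
--     pts = 0
--     rolls = Counter(turns)
--
--     for face, count in rolls.items():
--         triplets, remainder = divmod(count, 3)
--
--         if triplets:
--             pts += 1000 if face == 1 else face * 100
--
--         if remainder:
--             if face == 1:
--                 pts += remainder * 100
--             elif face == 5:
--                 pts += remainder * 50
--
--     return pts
-- ===== SOURCE B (Python) =====
-- def _contrib(face, count):
--     pts = 0
--     triplets, remainder = divmod(count, 3)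
--     if triplets:
--         pts += 1000 if face == 1 else face * 100
--     if remainder:
--         if face == 1:
--             pts += remainder * 100
--         elif face == 5:
--             pts += remainder * 50
--     return pts
--
--
-- def score_with_counter(turns):
--     s = sorted(turns)
--     n = len(s)
--     pts = 0
--     i = 0
--     while i < n:
--         j = i + 1
--         while j < n and s[j] == s[i]:
--             j += 1
--         pts += _contrib(s[i], j - i)
--         i = j
--     return pts
-- ===== Notes on version B (the rewrite author's own statement) =====
-- stated objective: alternative
-- what changed: Counts are obtained by sorting the rolls and run-length scanning consecutive equal faces instead of hash-tallying with collections.Counter; per-face divmod scoring is unchanged and the sum is order-independent.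
import Mathlib
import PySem

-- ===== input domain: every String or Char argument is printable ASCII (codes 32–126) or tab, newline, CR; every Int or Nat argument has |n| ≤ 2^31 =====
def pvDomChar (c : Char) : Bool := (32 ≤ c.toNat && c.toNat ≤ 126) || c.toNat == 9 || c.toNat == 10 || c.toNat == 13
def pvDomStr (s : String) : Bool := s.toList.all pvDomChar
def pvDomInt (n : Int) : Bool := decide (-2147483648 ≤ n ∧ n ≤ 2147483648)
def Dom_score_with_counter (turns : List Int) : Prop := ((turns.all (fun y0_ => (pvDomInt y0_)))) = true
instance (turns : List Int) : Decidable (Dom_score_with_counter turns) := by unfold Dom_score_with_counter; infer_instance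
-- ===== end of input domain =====

-- B replaces the Counter hash-tally by sort + run-length scan over consecutive equal faces (alternative decomposition, same per-face scoring).


-- ===== PORT A =====
-- rolls = Counter(turns); for face, count in rolls.items(): divmod(count, 3) scoring accumulated into pts
def score_with_counter (turns : List Int) : Int :=
  (PySem.Dict.counter turns).items.foldl (fun pts fc =>
    let face := fc.1
    let count := fc.2
    let triplets := PySem.Int.floordiv count 3
    let remainder := PySem.Int.mod count 3
    let pts := if triplets ≠ 0 then pts + (if face = 1 then 1000 else face * 100) else pts
    if remainder ≠ 0 then
      (if face = 1 then pts + remainder * 100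
       else if face = 5 then pts + remainder * 50 else pts)
    else pts) 0

-- ===== PORT B =====
-- _contrib(face, count): the per-face divmod scoring
def pvContrib (face : Int) (count : Int) : Int :=
  let triplets := PySem.Int.floordiv count 3
  let remainder := PySem.Int.mod count 3
  let pts : Int := 0
  let pts := if triplets ≠ 0 then pts + (if face = 1 then 1000 else face * 100) else pts
  if remainder ≠ 0 then
    (if face = 1 then pts + remainder * 100
     else if face = 5 then pts + remainder * 50 else pts)
  else pts

-- outer while loop: the inner "while j < n and s[j] == s[i]" is the takeWhile, advancing i to j is the dropWhile
def pvScanRuns : List Int → Int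
  | [] => 0
  | x :: xs =>
      pvContrib x (((xs.takeWhile (fun y => y == x)).length + 1 : Nat)) +
        pvScanRuns (xs.dropWhile (fun y => y == x))
termination_by l => l.length
decreasing_by
  simp only [List.length_cons]
  exact Nat.lt_succ_of_le (List.length_dropWhile_le _ _)

def score_with_counter_alt (turns : List Int) : Int :=
  pvScanRuns (PySem.List.sorted turns (fun x => x) false)

-- ===== PRECONDITION & SPEC =====
def Spec_score_with_counter (turns : List Int) (out : Int) : Prop := out = score_with_counter_alt turns
instance (turns : List Int) (out : Int) : Decidable (Spec_score_with_counter turns out) := by unfold Spec_score_with_counter; infer_instance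

-- ===== CLAIM (what is proved, stated in full; the proofs are below) =====
def Claim_equal_score_with_counter : Prop := ∀ (turns : List Int), Dom_score_with_counter turns → Spec_score_with_counter turns (score_with_counter turns)

-- ===== LEMMAS AND PROOFS =====

-- A's loop body adds the per-face contribution to the accumulator
lemma stepA_eq (pts : Int) (fc : Int × Int) :
    (let face := fc.1
     let count := fc.2
     let triplets := PySem.Int.floordiv count 3
     let remainder := PySem.Int.mod count 3
     let pts := if triplets ≠ 0 then pts + (if face = 1 then 1000 else face * 100) else pts
     if remainder ≠ 0 then
       (if face = 1 then pts + remainder * 100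
        else if face = 5 then pts + remainder * 50 else pts)
     else pts) = pts + pvContrib fc.1 fc.2 := by
  simp only [pvContrib]
  split_ifs <;> ring

-- A = sum of per-face contributions over the distinct faces
lemma score_A_eq_sum (turns : List Int) :
    score_with_counter turns
      = ((PySem.Set.ofList turns).map (fun k => pvContrib k ((turns.count k : Nat) : Int))).sum := by
  unfold score_with_counter
  rw [PySem.Dict.items_counter]
  have hf : (fun (pts : Int) (fc : Int × Int) =>
      let face := fc.1
      let count := fc.2
      let triplets := PySem.Int.floordiv count 3
      let remainder := PySem.Int.mod count 3
      let pts := if triplets ≠ 0 then pts + (if face = 1 then 1000 else face * 100) else pts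
      if remainder ≠ 0 then
        (if face = 1 then pts + remainder * 100
         else if face = 5 then pts + remainder * 50 else pts)
      else pts) = fun pts fc => pts + pvContrib fc.1 fc.2 := by
    funext pts fc; exact stepA_eq pts fc
  rw [hf, PySem.List.foldl_add]
  simp [List.map_map, Function.comp_def]

lemma discard_of_not_mem (s : List Int) (x : Int) (h : x ∉ s) : PySem.Set.discard s x = s := by
  simp only [PySem.Set.discard]
  apply List.filter_eq_self.mpr
  intro y hy
  simp only [Bool.not_eq_eq_eq_not, Bool.not_true, beq_eq_false_iff_ne]
  exact fun he => h (he ▸ hy)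

-- distinct elements of a list "x-run then a tail without x"
lemma ofList_run (x : Int) (t d : List Int) (ht : ∀ y ∈ t, y = x) (hd : x ∉ d) :
    PySem.Set.ofList (x :: (t ++ d)) = x :: PySem.Set.ofList d := by
  induction t with
  | nil =>
      rw [List.nil_append, PySem.Set.ofList_cons,
        discard_of_not_mem _ _ (by simpa [PySem.Set.mem_ofList] using hd)]
  | cons a t' ih =>
      have hax : a = x := ht a (by simp)
      subst hax
      have ih' := ih (fun y hy => ht y (List.mem_cons_of_mem _ hy))
      rw [List.cons_append, PySem.Set.ofList_cons, ih']
      congr 1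
      simp only [PySem.Set.discard, List.filter_cons, beq_self_eq_true, Bool.not_true,
        Bool.false_eq_true, if_false]
      exact discard_of_not_mem _ _ (fun hm => hd ((PySem.Set.mem_ofList d a).mp hm))

-- run-length scan of a ≤-sorted list = sum of contributions over its distinct values
lemma scanRuns_eq_sum (s : List Int) (hs : s.Pairwise (· ≤ ·)) :
    pvScanRuns s
      = ((PySem.Set.ofList s).map (fun k => pvContrib k ((s.count k : Nat) : Int))).sum := by
  induction s using pvScanRuns.induct with
  | case1 => simp [pvScanRuns, PySem.Set.ofList]
  | case2 x xs ih =>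
      have hxs : xs.takeWhile (fun y => y == x) ++ xs.dropWhile (fun y => y == x) = xs :=
        List.takeWhile_append_dropWhile
      set t := xs.takeWhile (fun y => y == x) with ht
      set d := xs.dropWhile (fun y => y == x) with hd
      have htx : ∀ y ∈ t, y = x := by
        intro y hy
        have := List.mem_takeWhile_imp hy
        simpa using this
      have hps : xs.Pairwise (· ≤ ·) := (List.pairwise_cons.mp hs).2
      have hle : ∀ y ∈ xs, x ≤ y := (List.pairwise_cons.mp hs).1
      have hpd : d.Pairwise (· ≤ ·) := hps.sublist (List.dropWhile_sublist _)
      have hxd : x ∉ d := by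
        intro hm
        obtain ⟨h0, rest, hD⟩ : ∃ h0 rest, d = h0 :: rest := by
          cases hE : d with
          | nil => rw [hE] at hm; simp at hm
          | cons a b => exact ⟨a, b, rfl⟩
        have hh0 : (h0 == x) = false := by
          have h := List.head?_dropWhile_not (fun y => y == x) xs
          rw [← hd, hD] at h
          simpa using h
        have hh0xs : h0 ∈ xs := (List.dropWhile_sublist _).subset (hd ▸ hD ▸ List.mem_cons_self)
        have hh0x : x < h0 := by
          have := hle h0 hh0xs
          simp at hh0
          omega
        rw [hD] at hm
        rcases List.mem_cons.mp hm with h1 | h1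
        · omega
        · have : h0 ≤ x := by
            rw [hD] at hpd
            exact (List.pairwise_cons.mp hpd).1 x h1
          omega
      have hofl : PySem.Set.ofList (x :: xs) = x :: PySem.Set.ofList d := by
        rw [← hxs]; exact ofList_run x t d htx hxd
      have hcx : (x :: xs).count x = t.length + 1 := by
        rw [← hxs, List.count_cons_self, List.count_append]
        have h1 : t.count x = t.length := List.count_eq_length.mpr (fun b hb => (htx b hb).symm)
        have h2 : d.count x = 0 := List.count_eq_zero.mpr hxd
        omega
      have hck : ∀ k ∈ PySem.Set.ofList d, (x :: xs).count k = d.count k := by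
        intro k hk
        have hkd : k ∈ d := (PySem.Set.mem_ofList d k).mp hk
        have hkx : k ≠ x := fun he => hxd (he ▸ hkd)
        have h1 : List.count k t = 0 := List.count_eq_zero.mpr (fun hkt => hkx (htx k hkt))
        rw [← hxs]
        simp [List.count_append, h1, Ne.symm hkx]
      have hmap : (PySem.Set.ofList d).map (fun k => pvContrib k ((List.count k (x :: xs) : Nat) : Int))
          = (PySem.Set.ofList d).map (fun k => pvContrib k ((List.count k d : Nat) : Int)) :=
        List.map_congr_left (fun k hk => by rw [hck k hk])
      rw [pvScanRuns, ← ht, ← hd, ih hpd, hofl, List.map_cons, List.sum_cons, hcx, hmap]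

-- the two distinct-face lists are permutations with identical counts
lemma alt_eq_sum (turns : List Int) :
    score_with_counter_alt turns
      = ((PySem.Set.ofList turns).map (fun k => pvContrib k ((turns.count k : Nat) : Int))).sum := by
  unfold score_with_counter_alt
  set s := PySem.List.sorted turns (fun x => x) false with hsdef
  have hperm : s.Perm turns := PySem.List.sorted_perm turns (fun x => x) false
  have hpw : s.Pairwise (· ≤ ·) := by
    have := PySem.List.sorted_pairwise turns (fun x : Int => x)
    simpa using this
  rw [scanRuns_eq_sum s hpw]
  have hsetperm : (PySem.Set.ofList s).Perm (PySem.Set.ofList turns) := by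
    rw [List.perm_ext_iff_of_nodup (PySem.Set.nodup_ofList s) (PySem.Set.nodup_ofList turns)]
    intro a
    simp only [PySem.Set.mem_ofList]
    exact hperm.mem_iff
  have hcount : ∀ k, s.count k = turns.count k := fun k => hperm.count_eq k
  calc ((PySem.Set.ofList s).map (fun k => pvContrib k ((s.count k : Nat) : Int))).sum
      = ((PySem.Set.ofList s).map (fun k => pvContrib k ((turns.count k : Nat) : Int))).sum := by
        simp only [hcount]
    _ = ((PySem.Set.ofList turns).map (fun k => pvContrib k ((turns.count k : Nat) : Int))).sum :=
        (hsetperm.map _).sum_eq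

-- ===== VERDICT (by name: the statement is the Claim_ definition above) =====
theorem score_with_counter_spec : Claim_equal_score_with_counter := by
  intro turns _
  unfold Spec_score_with_counter
  rw [score_A_eq_sum, alt_eq_sum]
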